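-- pv_equiv track=rewrite | github.com/AndrewWell/MPL | MPL_4.py | checkCharOneByOne
-- ===== SOURCE A (Python) =====
-- def checkCharOneByOne(string: str, searchSymbol: chr) -> bool:
--     num = 0
--     for i in string:
--         if i == searchSymbol:
--             num += 1
--             if num > 1: return False
--         else:
--             num = 0
--     return True
-- ===== SOURCE B (Python) =====
-- def checkCharOneByOne(string: str, searchSymbol: str) -> bool:
--     return not any(a == searchSymbol and b == searchSymbol
--                    for a, b in zip(string, string[1:]))
-- ===== Notes on version B (the rewrite author's own statement) =====
-- stated objective: idiomatic
-- what changed: Replaced the running match-counter with reset logic by a pairwise scan over adjacent characters via zip(string, string[1:]) under not any(...).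
import Mathlib
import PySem

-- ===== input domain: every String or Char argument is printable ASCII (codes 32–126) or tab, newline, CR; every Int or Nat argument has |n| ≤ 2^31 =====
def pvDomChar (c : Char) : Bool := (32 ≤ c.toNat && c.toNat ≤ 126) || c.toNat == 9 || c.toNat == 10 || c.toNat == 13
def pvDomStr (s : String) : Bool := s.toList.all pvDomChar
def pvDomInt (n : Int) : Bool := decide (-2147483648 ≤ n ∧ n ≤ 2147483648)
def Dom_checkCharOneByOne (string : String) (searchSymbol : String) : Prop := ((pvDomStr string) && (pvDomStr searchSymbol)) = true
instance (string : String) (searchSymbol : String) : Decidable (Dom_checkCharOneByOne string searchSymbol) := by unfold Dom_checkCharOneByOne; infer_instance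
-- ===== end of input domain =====

-- B replaces A's running match-counter by an adjacent-pair scan (more idiomatic); same O(n) cost.

-- ===== PORT A =====
-- the loop of A: `num` is the running counter, early return False modelled by the `false` branch
def pvALoop (searchSymbol : String) : List Char → Int → Bool
  | [], _ => true
  | c :: rest, num =>
    if String.ofList [c] = searchSymbol then
      if num + 1 > 1 then false else pvALoop searchSymbol rest (num + 1)
    else
      pvALoop searchSymbol rest 0

def checkCharOneByOne (string : String) (searchSymbol : String) : Bool :=
  pvALoop searchSymbol string.toList 0

-- ===== PORT B =====
def checkCharOneByOne_alt (string : String) (searchSymbol : String) : Bool :=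
  !((string.toList.zip string.toList.tail).any
      (fun p => decide (String.ofList [p.1] = searchSymbol) && decide (String.ofList [p.2] = searchSymbol)))

-- ===== PRECONDITION & SPEC =====
def Spec_checkCharOneByOne (string : String) (searchSymbol : String) (out : Bool) : Prop := out = checkCharOneByOne_alt string searchSymbol
instance (string : String) (searchSymbol : String) (out : Bool) : Decidable (Spec_checkCharOneByOne string searchSymbol out) := by unfold Spec_checkCharOneByOne; infer_instance

-- ===== CLAIM (what is proved, stated in full; the proofs are below) =====
def Claim_equal_checkCharOneByOne : Prop := ∀ (string : String) (searchSymbol : String), Dom_checkCharOneByOne string searchSymbol → Spec_checkCharOneByOne string searchSymbol (checkCharOneByOne string searchSymbol)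

-- ===== LEMMAS AND PROOFS =====

def pvPairs (searchSymbol : String) (l : List Char) : Bool :=
  !((l.zip l.tail).any
      (fun p => decide (String.ofList [p.1] = searchSymbol) && decide (String.ofList [p.2] = searchSymbol)))

def pvHeadMatch (s : String) : List Char → Bool
  | [] => false
  | c :: _ => decide (String.ofList [c] = s)

-- core invariant: with counter 0 the loop computes the pairwise scan; with counter 1 it also
-- rejects when the head matches
theorem pvALoop_char (s : String) (l : List Char) :
    pvALoop s l 0 = pvPairs s l ∧
    pvALoop s l 1 = (!pvHeadMatch s l && pvPairs s l) := by
  induction l with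
  | nil => simp [pvALoop, pvPairs, pvHeadMatch]
  | cons c rest ih =>
    obtain ⟨ih0, ih1⟩ := ih
    constructor
    · show pvALoop s (c :: rest) 0 = _
      by_cases h : String.ofList [c] = s
      · simp only [pvALoop, h, if_true]
        norm_num
        rw [ih1]
        cases rest with
        | nil => simp [pvPairs, pvHeadMatch]
        | cons d t =>
          by_cases hd : String.ofList [d] = s
          · simp [pvPairs, pvHeadMatch, h, hd]
          · simp [pvPairs, pvHeadMatch, hd]
      · simp only [pvALoop, if_neg h]
        rw [ih0]
        cases rest with
        | nil => simp [pvPairs, pvHeadMatch]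
        | cons d t => simp [pvPairs, h]
    · show pvALoop s (c :: rest) 1 = _
      by_cases h : String.ofList [c] = s
      · simp [pvALoop, pvHeadMatch, h]
      · simp only [pvALoop, if_neg h]
        rw [ih0]
        cases rest with
        | nil => simp [pvPairs, pvHeadMatch, h]
        | cons d t => simp [pvPairs, pvHeadMatch, h]

-- ===== VERDICT (by name: the statement is the Claim_ definition above) =====
theorem checkCharOneByOne_spec : Claim_equal_checkCharOneByOne := by
  intro s sym _
  show checkCharOneByOne s sym = checkCharOneByOne_alt s sym
  exact (pvALoop_char sym s.toList).1
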